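-- pv_equiv track=rewrite | github.com/tbnorth/itassets | itassets/itassets.py | dot_node_name
-- ===== SOURCE A (Python) =====
-- def dot_node_name(text):
--     """Handle wide node names"""
--     hlen = len(text) // 2
--     if hlen <= 8:
--         return text
--     i = 0
--     at = None
--     while i < hlen - 1:
--         if text[hlen + i] in ' _-':
--             at = hlen + i
--             break
--         if text[hlen - i] in ' _-':
--             at = hlen - i
--             break
--         i += 1
--     if at is not None:
--         return text[:at] + '\\n' + text[at:]
--     return text
-- ===== SOURCE B (Python) =====
-- def dot_node_name(text):
--     """Handle wide node names"""
--     hlen = len(text) // 2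
--     if hlen <= 8:
--         return text
--     # nearest break char at or after the middle (positions hlen..2*hlen-2)
--     fwd = None
--     for p in range(hlen, 2 * hlen - 1):
--         if text[p] in ' _-':
--             fwd = p
--             break
--     # nearest break char at or before the middle (positions hlen..2)
--     bwd = None
--     for p in range(hlen, 1, -1):
--         if text[p] in ' _-':
--             bwd = p
--             break
--     if fwd is None and bwd is None:
--         return text
--     if bwd is None or (fwd is not None and fwd - hlen <= hlen - bwd):
--         at = fwd
--     else:
--         at = bwd
--     return text[:at] + '\\n' + text[at:]
-- ===== Notes on version B (the rewrite author's own statement) =====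
-- stated objective: alternative
-- what changed: A's single interleaved outward scan from the middle with an early break is replaced by two independent directional scans (nearest break character at-or-after and at-or-before the middle) followed by a distance comparison that prefers the forward side on ties.
import Mathlib
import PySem

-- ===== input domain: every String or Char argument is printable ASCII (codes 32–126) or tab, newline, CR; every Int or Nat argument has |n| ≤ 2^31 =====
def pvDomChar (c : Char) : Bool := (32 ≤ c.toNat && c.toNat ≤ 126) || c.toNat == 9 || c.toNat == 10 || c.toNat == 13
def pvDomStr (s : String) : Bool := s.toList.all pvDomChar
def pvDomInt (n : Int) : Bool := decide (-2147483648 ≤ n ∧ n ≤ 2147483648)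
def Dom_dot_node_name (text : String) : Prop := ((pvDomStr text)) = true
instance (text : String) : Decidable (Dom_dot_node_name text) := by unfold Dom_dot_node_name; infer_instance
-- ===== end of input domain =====

-- B replaces A's interleaved outward scan (break on first hit) by two independent
-- directional scans (nearest break char at-or-after and at-or-before the middle)
-- followed by a distance comparison; same O(n) cost, a plainer decomposition.

-- ===== PORT A =====
-- "c in ' _-'"
def dotA_sep (c : Char) : Bool := c == ' ' || c == '_' || c == '-'

-- the while loop; text[hlen±i] is always in range here (2 ≤ pos ≤ 2*hlen-2 < len),
-- so the pyGetD default is never read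
def dotA_loop (cs : List Char) (hlen i : Int) : Option Int :=
  if i < hlen - 1 then
    if dotA_sep (PySem.List.pyGetD cs (hlen + i) 'x') then some (hlen + i)
    else if dotA_sep (PySem.List.pyGetD cs (hlen - i) 'x') then some (hlen - i)
    else dotA_loop cs hlen (i + 1)
  else none
termination_by (hlen - 1 - i).toNat
decreasing_by omega

def dot_node_name (text : String) : String :=
  let cs := text.toList
  let hlen : Int := PySem.Int.floordiv (cs.length : Int) 2
  if hlen ≤ 8 then text
  else
    match dotA_loop cs hlen 0 with
    | some at_ =>
        -- text[:at] + '\\n' + text[at:]  ('\\n' is the two characters backslash, n)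
        String.ofList (PySem.List.slice cs none (some at_) ++ ['\\', 'n'] ++
                       PySem.List.slice cs (some at_) none)
    | none => text

-- ===== PORT B =====
-- "c in ' _-'"
def dotB_sep (c : Char) : Bool := c == ' ' || c == '_' || c == '-'

-- first hit in range(hlen, 2*hlen-1); index always in range when called (default unread)
def dotB_fwd (cs : List Char) (hlen p : Int) : Option Int :=
  if p < 2 * hlen - 1 then
    if dotB_sep (PySem.List.pyGetD cs p 'x') then some p
    else dotB_fwd cs hlen (p + 1)
  else none
termination_by (2 * hlen - 1 - p).toNat
decreasing_by omega

-- first hit in range(hlen, 1, -1); index always in range when called (default unread)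
def dotB_bwd (cs : List Char) (p : Int) : Option Int :=
  if 1 < p then
    if dotB_sep (PySem.List.pyGetD cs p 'x') then some p
    else dotB_bwd cs (p - 1)
  else none
termination_by p.toNat
decreasing_by omega

def dot_node_name_alt (text : String) : String :=
  let cs := text.toList
  let hlen : Int := PySem.Int.floordiv (cs.length : Int) 2
  if hlen ≤ 8 then text
  else
    let fwd := dotB_fwd cs hlen hlen
    let bwd := dotB_bwd cs hlen
    match fwd, bwd with
    | none, none => text
    | some f, none =>
        String.ofList (PySem.List.slice cs none (some f) ++ ['\\', 'n'] ++
                       PySem.List.slice cs (some f) none)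
    | none, some b =>
        String.ofList (PySem.List.slice cs none (some b) ++ ['\\', 'n'] ++
                       PySem.List.slice cs (some b) none)
    | some f, some b =>
        if f - hlen ≤ hlen - b then
          String.ofList (PySem.List.slice cs none (some f) ++ ['\\', 'n'] ++
                         PySem.List.slice cs (some f) none)
        else
          String.ofList (PySem.List.slice cs none (some b) ++ ['\\', 'n'] ++
                         PySem.List.slice cs (some b) none)

-- ===== PRECONDITION & SPEC =====
def Spec_dot_node_name (text : String) (out : String) : Prop := out = dot_node_name_alt text
instance (text : String) (out : String) : Decidable (Spec_dot_node_name text out) := by unfold Spec_dot_node_name; infer_instance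

-- ===== CLAIM (what is proved, stated in full; the proofs are below) =====
def Claim_equal_dot_node_name : Prop := ∀ (text : String), Dom_dot_node_name text → Spec_dot_node_name text (dot_node_name text)

-- ===== LEMMAS AND PROOFS =====

-- B's selection rule, as a function of the two scan results
def dotSel (hlen : Int) (f b : Option Int) : Option Int :=
  match f, b with
  | none, none => none
  | some f, none => some f
  | none, some b => some b
  | some f, some b => if f - hlen ≤ hlen - b then some f else some b

lemma sepBA : dotB_sep = dotA_sep := rfl

lemma dotB_fwd_ge (cs : List Char) (hlen p f : Int) (h : dotB_fwd cs hlen p = some f) : p ≤ f := by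
  induction p using dotB_fwd.induct cs hlen with
  | case1 p hp hhit => rw [dotB_fwd, if_pos hp, if_pos hhit] at h; injection h with h; omega
  | case2 p hp hhit ih =>
      rw [dotB_fwd, if_pos hp, if_neg hhit] at h
      have := ih h; omega
  | case3 p hp => rw [dotB_fwd, if_neg hp] at h; simp at h

lemma dotB_bwd_le (cs : List Char) (p b : Int) (h : dotB_bwd cs p = some b) : b ≤ p := by
  induction p using dotB_bwd.induct cs with
  | case1 p hp hhit => rw [dotB_bwd, if_pos hp, if_pos hhit] at h; injection h with h; omega
  | case2 p hp hhit ih =>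
      rw [dotB_bwd, if_pos hp, if_neg hhit] at h
      have := ih h; omega
  | case3 p hp => rw [dotB_bwd, if_neg hp] at h; simp at h

lemma dotA_loop_eq_sel (cs : List Char) (hlen : Int) :
    ∀ i : Int, dotA_loop cs hlen i = dotSel hlen (dotB_fwd cs hlen (hlen + i)) (dotB_bwd cs (hlen - i)) := by
  intro i
  induction i using dotA_loop.induct cs hlen with
  | case1 i hi hhit =>
      rw [dotA_loop, if_pos hi, if_pos hhit]
      rw [dotB_fwd, if_pos (by omega), sepBA, if_pos hhit]
      cases hb : dotB_bwd cs (hlen - i) with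
      | none => simp [dotSel]
      | some b =>
          have := dotB_bwd_le cs (hlen - i) b hb
          simp [dotSel]
          omega
  | case2 i hi hhit1 hhit2 =>
      rw [dotA_loop, if_pos hi, if_neg hhit1, if_pos hhit2]
      rw [dotB_fwd, if_pos (by omega), sepBA, if_neg hhit1]
      rw [dotB_bwd, if_pos (by omega), sepBA, if_pos hhit2]
      cases hf : dotB_fwd cs hlen (hlen + i + 1) with
      | none => simp [dotSel]
      | some f =>
          have := dotB_fwd_ge cs hlen (hlen + i + 1) f hf
          simp [dotSel]
          omega
  | case3 i hi hhit1 hhit2 ih =>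
      rw [dotA_loop, if_pos hi, if_neg hhit1, if_neg hhit2]
      rw [dotB_fwd, if_pos (by omega), sepBA, if_neg hhit1]
      rw [dotB_bwd, if_pos (by omega), sepBA, if_neg hhit2]
      rw [ih]
      congr 1 <;> ring_nf
  | case4 i hi =>
      rw [dotA_loop, if_neg hi]
      rw [dotB_fwd, if_neg (by omega)]
      rw [dotB_bwd, if_neg (by omega)]
      rfl

-- ===== VERDICT (by name: the statement is the Claim_ definition above) =====
theorem dot_node_name_spec : Claim_equal_dot_node_name := by
  intro text _
  unfold Spec_dot_node_name
  simp only [dot_node_name, dot_node_name_alt]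
  by_cases h8 : PySem.Int.floordiv ((text.toList.length : Int)) 2 ≤ 8
  · rw [if_pos h8, if_pos h8]
  · rw [if_neg h8, if_neg h8]
    have key := dotA_loop_eq_sel text.toList (PySem.Int.floordiv ((text.toList.length : Int)) 2) 0
    simp only [add_zero, sub_zero] at key
    rw [key]
    cases hf : dotB_fwd text.toList (PySem.Int.floordiv ((text.toList.length : Int)) 2)
        (PySem.Int.floordiv ((text.toList.length : Int)) 2) with
    | none =>
        cases hb : dotB_bwd text.toList (PySem.Int.floordiv ((text.toList.length : Int)) 2) with
        | none => simp [dotSel]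
        | some b => simp [dotSel]
    | some f =>
        cases hb : dotB_bwd text.toList (PySem.Int.floordiv ((text.toList.length : Int)) 2) with
        | none => simp [dotSel]
        | some b =>
            simp only [dotSel]
            by_cases hle : f - PySem.Int.floordiv ((text.toList.length : Int)) 2 ≤
                PySem.Int.floordiv ((text.toList.length : Int)) 2 - b
            · rw [if_pos hle, if_pos hle]
            · rw [if_neg hle, if_neg hle]
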